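-- pv_equiv track=rewrite | github.com/Dittttto/coding-test | 프로그래머스/2/49993. 스킬트리/스킬트리.py | solution
-- ===== SOURCE A (Python) =====
-- def solution(skill, skill_trees):
--     skill_arr = list(skill)
--     before_check = {skill_arr[0]: None}
--     for i in range(1, len(skill_arr)):
--         before_check[skill_arr[i]] =skill_arr[i-1]
--
--     answer = 0
--     for skill_set in skill_trees:
--         skill_order = {key:False for key in skill_arr}
--         flag = True
--         for skill in skill_set:
--             if skill in skill_order and before_check[skill] == None:
--                 skill_order[skill] = True
--             elif skill in skill_order:
--                 if skill_order[before_check[skill]]: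
--                     skill_order[skill] = True
--                 else:
--                     flag = False
--                     break
--         if flag:
--             answer += 1
--     return answer
-- ===== SOURCE B (Python) =====
-- def solution(skill, skill_trees):
--     pos = {c: i for i, c in enumerate(skill)}
--     answer = 0
--     for tree in skill_trees:
--         idx = 0
--         for c in tree:
--             p = pos.get(c)
--             if p is None or p < idx:
--                 continue
--             if p == idx:
--                 idx += 1
--             else:
--                 break
--         else:
--             answer += 1
--     return answer
-- ===== Notes on version B (the rewrite author's own statement) =====
-- stated objective: faster
-- what changed: Replaces A's per-tree rebuilt boolean unlock-dict plus predecessor map with a position map computed once and a single integer pointer maintained per tree; the O(|skill|) per-tree dict construction and the predecessor lookups disappear.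
import Mathlib
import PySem

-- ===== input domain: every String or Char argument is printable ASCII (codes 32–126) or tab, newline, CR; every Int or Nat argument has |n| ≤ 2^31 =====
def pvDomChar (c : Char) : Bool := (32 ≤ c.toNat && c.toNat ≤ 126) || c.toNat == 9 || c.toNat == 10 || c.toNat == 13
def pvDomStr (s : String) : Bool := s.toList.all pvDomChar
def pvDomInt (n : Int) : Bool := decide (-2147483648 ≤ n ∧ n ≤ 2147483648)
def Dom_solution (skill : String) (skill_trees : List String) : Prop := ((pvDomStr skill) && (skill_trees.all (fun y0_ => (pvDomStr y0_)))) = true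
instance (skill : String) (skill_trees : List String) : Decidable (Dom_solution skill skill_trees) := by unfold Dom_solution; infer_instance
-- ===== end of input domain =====

-- B replaces A's per-tree boolean unlock-dict plus predecessor map with a one-time position map
-- and a single integer pointer per tree (objective: faster; A rebuilds an O(|skill|) dict for every tree).


-- ===== PORT A =====
-- before_check = {skill_arr[0]: None} then before_check[skill_arr[i]] = skill_arr[i-1] for i in
-- range(1, len(skill_arr)). On skill = "" Python raises IndexError at skill_arr[0] (excluded by
-- Pre_solution); the pyGet? 'none' arm there is unreachable under Pre_.
def aBefore (skill_arr : List Char) : PySem.Dict Char (Option Char) :=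
  let bc0 : PySem.Dict Char (Option Char) :=
    match PySem.List.pyGet? skill_arr (0 : Int) with
    | some c => PySem.Dict.empty.insert c none
    | none => PySem.Dict.empty
  (PySem.List.pyRange 1 (PySem.List.len skill_arr) 1).foldl
    (fun d i => d.insert (PySem.List.pyGetD skill_arr i ' ')
                         (some (PySem.List.pyGetD skill_arr (i - 1) ' '))) bc0

-- skill_order = {key: False for key in skill_arr}, rebuilt for each tree
def aOrder0 (skill_arr : List Char) : PySem.Dict Char Bool :=
  skill_arr.foldl (fun d key => d.insert key false) PySem.Dict.empty

-- the inner 'for skill in skill_set' loop of A; flag=False + break is returning false.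
-- A's subscripts before_check[skill] / skill_order[before_check[skill]] are ported with getD:
-- both dicts are keyed by exactly the chars of skill, so the key is present whenever that
-- expression is reached (Python raises no KeyError there).
def aInner (bc : PySem.Dict Char (Option Char)) : List Char → PySem.Dict Char Bool → Bool
  | [], _ => true
  | c :: rest, so =>
    match so.get? c with
    | none => aInner bc rest so
    | some _ =>
      match bc.getD c none with
      | none => aInner bc rest (so.insert c true)
      | some p => if so.getD p false then aInner bc rest (so.insert c true) else false

def solution (skill : String) (skill_trees : List String) : Int :=
  let skill_arr := skill.toList
  let before_check := aBefore skill_arr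
  skill_trees.foldl (fun answer skill_set =>
    let skill_order := aOrder0 skill_arr
    if aInner before_check skill_set.toList skill_order then answer + 1 else answer) 0

-- ===== PORT B =====
-- pos = {c: i for i, c in enumerate(skill)}
def bPos (L : List Char) : PySem.Dict Char Int :=
  (PySem.List.enumerate L 0).foldl (fun d q => d.insert q.2 q.1) PySem.Dict.empty

-- the inner 'for c in tree' loop of B: idx is the pointer, break is returning false, for/else true.
def bInner (pos : PySem.Dict Char Int) : List Char → Int → Bool
  | [], _ => true
  | c :: rest, idx =>
    match pos.get? c with
    | none => bInner pos rest idx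
    | some p =>
      if p < idx then bInner pos rest idx
      else if p == idx then bInner pos rest (idx + 1)
      else false

def solution_alt (skill : String) (skill_trees : List String) : Int :=
  let pos := bPos skill.toList
  skill_trees.foldl (fun answer tree =>
    if bInner pos tree.toList 0 then answer + 1 else answer) 0

-- ===== PRECONDITION & SPEC =====
-- A evaluates skill_arr[0]; Pre_solution excludes exactly the empty skill string, on which A raises IndexError.
def Pre_solution (skill : String) (skill_trees : List String) : Prop := skill ≠ ""
instance (skill : String) (skill_trees : List String) : Decidable (Pre_solution skill skill_trees) := by unfold Pre_solution; infer_instance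
def pvWitness_solution : String × List String := ("CBD", ["BACDE", "CBADF", "AECB", "BDA", "CBD"])

def Spec_solution (skill : String) (skill_trees : List String) (out : Int) : Prop := out = solution_alt skill skill_trees
instance (skill : String) (skill_trees : List String) (out : Int) : Decidable (Spec_solution skill skill_trees out) := by unfold Spec_solution; infer_instance

-- ===== CLAIM (what is proved, stated in full; the proofs are below) =====
def Claim_equal_solution : Prop := ∀ (skill : String) (skill_trees : List String), Dom_solution skill skill_trees → Pre_solution skill skill_trees → Spec_solution skill skill_trees (solution skill skill_trees)

-- ===== LEMMAS AND PROOFS =====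

-- index of the LAST occurrence of c in L: the value both dict builds are governed by (last write wins)
def lastIdx? : List Char → Char → Option Nat
  | [], _ => none
  | x :: xs, c =>
    match lastIdx? xs c with
    | some j => some (j + 1)
    | none => if x = c then some 0 else none

theorem lastIdx?_eq_none_iff (L : List Char) (c : Char) : lastIdx? L c = none ↔ c ∉ L := by
  induction L with
  | nil => simp [lastIdx?]
  | cons x xs ih =>
    simp only [lastIdx?, List.mem_cons]
    rcases h : lastIdx? xs c with _ | j
    · rw [h] at ih
      by_cases hx : x = c <;> simp [hx, ← ih, eq_comm (a := c)]
    · rw [h] at ih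
      simp only [reduceCtorEq, false_iff, not_or]
      intro hcon
      exact hcon.2 (by simpa using ih)

theorem lastIdx?_spec (L : List Char) (c : Char) (j : Nat) (h : lastIdx? L c = some j) :
    ∃ hj : j < L.length, L[j] = c := by
  induction L generalizing j with
  | nil => simp [lastIdx?] at h
  | cons x xs ih =>
    simp only [lastIdx?] at h
    rcases h' : lastIdx? xs c with _ | j'
    · rw [h'] at h
      by_cases hx : x = c <;> simp [hx] at h
      subst h; exact ⟨by simp, hx⟩
    · rw [h'] at h
      simp only [Option.some.injEq] at h
      obtain ⟨hj', hg⟩ := ih j' h'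
      subst h
      exact ⟨by simp; omega, by simpa using hg⟩

theorem le_lastIdx? (L : List Char) (c : Char) (i : Nat) (hi : i < L.length) (hc : L[i] = c) :
    ∃ m, lastIdx? L c = some m ∧ i ≤ m := by
  induction L generalizing i with
  | nil => simp at hi
  | cons x xs ih =>
    simp only [lastIdx?]
    rcases h' : lastIdx? xs c with _ | j'
    · cases i with
      | zero => simp at hc; simp [hc]
      | succ i' =>
        exfalso
        have hi' : i' < xs.length := by simpa using hi
        have hx : xs[i'] = c := by simpa using hc
        have : c ∈ xs := hx ▸ List.getElem_mem hi'
        exact absurd ((lastIdx?_eq_none_iff xs c).mp h') (by simp [this])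
    · refine ⟨j' + 1, rfl, ?_⟩
      cases i with
      | zero => omega
      | succ i' =>
        obtain ⟨m, hm, him⟩ := ih i' (by simpa using hi) (by simpa using hc)
        rw [h'] at hm; simp at hm; omega

theorem lastIdx?_append_singleton (xs : List Char) (x c : Char) :
    lastIdx? (xs ++ [x]) c = if x = c then some xs.length else lastIdx? xs c := by
  induction xs with
  | nil => by_cases h : x = c <;> simp [lastIdx?, h]
  | cons y ys ih =>
    simp only [List.cons_append, lastIdx?, ih]
    by_cases h : x = c
    · simp [h]
    · simp only [h, if_false]

theorem posDict_get? (L : List Char) (c : Char) (s : Int) (d : PySem.Dict Char Int) :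
    ((PySem.List.enumerate L s).foldl (fun d q => d.insert q.2 q.1) d).get? c =
      match lastIdx? L c with
      | some j => some (s + j)
      | none => d.get? c := by
  induction L generalizing s d with
  | nil => simp [PySem.List.enumerate_nil, lastIdx?]
  | cons x xs ih =>
    rw [PySem.List.enumerate_cons]
    simp only [List.foldl_cons, lastIdx?]
    rw [ih]
    rcases h' : lastIdx? xs c with _ | j'
    · rw [PySem.Dict.get?_insert]
      by_cases hx : c = x
      · simp [hx]
      · simp [hx, Ne.symm hx]
    · simp only []
      congr 1; push_cast; ring

theorem bcUpTo_get? (L : List Char) (hL : L ≠ []) (c : Char) (m : Nat) (h1 : 1 ≤ m) (hm : m ≤ L.length) :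
    (((PySem.List.pyRange 1 (m : Int) 1).foldl
        (fun (d : PySem.Dict Char (Option Char)) i =>
          d.insert (PySem.List.pyGetD L i ' ')
                   (some (PySem.List.pyGetD L (i - 1) ' ')))
        (match PySem.List.pyGet? L (0 : Int) with
         | some c0 => (PySem.Dict.empty : PySem.Dict Char (Option Char)).insert c0 none
         | none => PySem.Dict.empty)) : PySem.Dict Char (Option Char)).get? c =
      match lastIdx? (L.take m) c with
      | some j => some (if 0 < j then some (L.getD (j - 1) ' ') else none)
      | none => none := by
  induction m with
  | zero => omega
  | succ m ih =>
    by_cases hm1 : m = 0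
    · subst hm1
      obtain ⟨x, xs, rfl⟩ := List.exists_cons_of_ne_nil hL
      rw [PySem.List.pyRange_one_eq_nil (by norm_num)]
      simp only [List.foldl_nil]
      rw [PySem.List.pyGet?_zero_cons]
      simp only [List.take_succ_cons, List.take_zero, lastIdx?]
      rw [PySem.Dict.get?_insert]
      by_cases hx : c = x
      · simp [hx]
      · have hx' : ¬ x = c := fun h => hx h.symm
        simp [hx, hx', PySem.Dict.get?_empty]
    · have h1m : 1 ≤ m := by omega
      have hmL : m ≤ L.length := by omega
      have hcast : ((m : Int) + 1) = ((m + 1 : Nat) : Int) := by push_cast; ring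
      rw [← hcast, PySem.List.pyRange_one_succ_right (by exact_mod_cast h1m), List.foldl_append]
      simp only [List.foldl_cons, List.foldl_nil]
      have hmlt : m < L.length := by omega
      have hget : PySem.List.pyGetD L (m : Int) ' ' = L[m] := by
        rw [PySem.List.pyGetD_natCast, List.getD_eq_getElem?_getD, List.getElem?_eq_getElem hmlt]
        rfl
      have hget1 : PySem.List.pyGetD L ((m : Int) - 1) ' ' = L.getD (m - 1) ' ' := by
        have : ((m:Int) - 1) = ((m - 1 : Nat) : Int) := by omega
        rw [this, PySem.List.pyGetD_natCast]
      have htake : L.take (m + 1) = L.take m ++ [L[m]] := by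
        rw [List.take_add_one, List.getElem?_eq_getElem hmlt]
        rfl
      rw [hget, hget1, htake, lastIdx?_append_singleton]
      rw [PySem.Dict.get?_insert, ih h1m hmL]
      by_cases hx : c = L[m]
      · rw [if_pos hx, if_pos hx.symm]
        have hlen : (L.take m).length = m := by simp [hmlt.le]
        rw [hlen]
        simp [Nat.pos_of_ne_zero hm1]
      · rw [if_neg hx, if_neg (fun h => hx h.symm)]

theorem aBefore_get? (L : List Char) (hL : L ≠ []) (c : Char) :
    (aBefore L).get? c =
      match lastIdx? L c with
      | some j => some (if 0 < j then some (L.getD (j - 1) ' ') else none)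
      | none => none := by
  have h1 : 1 ≤ L.length := List.length_pos_of_ne_nil hL
  have := bcUpTo_get? L hL c L.length h1 le_rfl
  rw [List.take_length] at this
  unfold aBefore
  rw [PySem.List.len_eq]
  exact this

theorem bPos_get? (L : List Char) (c : Char) :
    (bPos L).get? c = (lastIdx? L c).map (fun j => (j : Int)) := by
  unfold bPos; rw [posDict_get?]
  rcases lastIdx? L c <;> simp

theorem aOrder0_get? (L : List Char) (c : Char) :
    (aOrder0 L).get? c = if c ∈ L then some false else none := by
  unfold aOrder0
  suffices h : ∀ d : PySem.Dict Char Bool,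
      (L.foldl (fun d key => d.insert key false) d).get? c =
        if c ∈ L then some false else d.get? c by
    rw [h]; split <;> simp [PySem.Dict.get?_empty]
  induction L with
  | nil => simp
  | cons x xs ih =>
    intro d
    simp only [List.foldl_cons, ih, List.mem_cons]
    by_cases hm : c ∈ xs
    · simp [hm]
    · rw [PySem.Dict.get?_insert]
      by_cases hx : c = x <;> simp [hx, hm]

-- the invariant transfer between the two inner loops: A's unlocked set is exactly the chars whose
-- last index is below B's pointer, and every index below the pointer is a last occurrence.
theorem inner_eq (L : List Char) (hL : L ≠ []) (tree : List Char) :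
    ∀ (k : Nat) (so : PySem.Dict Char Bool),
      k ≤ L.length →
      (∀ j (hj : j < L.length), j < k → lastIdx? L (L[j]) = some j) →
      (∀ c, so.get? c = (lastIdx? L c).map (fun j => decide (j < k))) →
      aInner (aBefore L) tree so = bInner (bPos L) tree (k : Int) := by
  induction tree with
  | nil => intros; rfl
  | cons c rest ih =>
    intro k so hk hreach hso
    simp only [aInner, bInner]
    rcases hcl : lastIdx? L c with _ | j
    · have h1 : so.get? c = none := by rw [hso c, hcl]; rfl
      have h2 : (bPos L).get? c = none := by rw [bPos_get?, hcl]; rfl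
      rw [h1, h2]
      exact ih k so hk hreach hso
    · have hsoc : so.get? c = some (decide (j < k)) := by rw [hso c, hcl]; rfl
      have hpos : (bPos L).get? c = some (j : Int) := by rw [bPos_get?, hcl]; rfl
      have hbcD : (aBefore L).getD c none = if 0 < j then some (L.getD (j - 1) ' ') else none := by
        rw [PySem.Dict.getD_eq_get?_getD, aBefore_get? L hL c, hcl]
        rfl
      obtain ⟨hjlen, hLj⟩ := lastIdx?_spec L c j hcl
      rw [hsoc, hpos, hbcD]
      dsimp only
      rcases Nat.lt_trichotomy j k with hjk | hjk | hjk
      · -- j < k : already unlocked, both continue with unchanged state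
        have hblt : ((j : Int) < (k : Int)) := by exact_mod_cast hjk
        rw [if_pos hblt]
        have hsonew : ∀ c', (so.insert c true).get? c' =
            (lastIdx? L c').map (fun j' => decide (j' < k)) := by
          intro c'
          rw [PySem.Dict.get?_insert]
          by_cases hc' : c' = c
          · subst hc'; rw [if_pos rfl, hcl]; simp [hjk]
          · rw [if_neg hc']; exact hso c'
        have hrec : aInner (aBefore L) rest (so.insert c true) = bInner (bPos L) rest (k : Int) :=
          ih k _ hk hreach hsonew
        by_cases hj0 : 0 < j
        · rw [if_pos hj0]
          dsimp only
          have hpred : lastIdx? L (L.getD (j - 1) ' ') = some (j - 1) := by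
            rw [List.getD_eq_getElem?_getD, List.getElem?_eq_getElem (by omega : j - 1 < L.length)]
            exact hreach (j - 1) (by omega) (by omega)
          have hgv : so.getD (L.getD (j - 1) ' ') false = true := by
            rw [PySem.Dict.getD_eq_get?_getD, hso _, hpred]
            simp; omega
          simp only [hgv, if_true]
          exact hrec
        · rw [if_neg hj0]
          dsimp only
          exact hrec
      · -- j = k : both unlock / advance
        subst hjk
        have hnlt : ¬ ((j : Int) < (j : Int)) := by omega
        have hbeq : ((j : Int) == (j : Int)) = true := by simp
        rw [if_neg hnlt]
        simp only [hbeq, if_true]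
        have hk' : j + 1 ≤ L.length := hjlen
        have hreach' : ∀ j' (hj' : j' < L.length), j' < j + 1 → lastIdx? L (L[j']) = some j' := by
          intro j' hj' hlt
          rcases Nat.lt_or_ge j' j with h | h
          · exact hreach j' hj' h
          · have : j' = j := by omega
            subst this
            rw [hLj]; exact hcl
        have hsonew : ∀ c', (so.insert c true).get? c' =
            (lastIdx? L c').map (fun j' => decide (j' < j + 1)) := by
          intro c'
          rw [PySem.Dict.get?_insert]
          by_cases hc' : c' = c
          · subst hc'; rw [if_pos rfl, hcl]; simp
          · rw [if_neg hc', hso c']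
            rcases hcl' : lastIdx? L c' with _ | j''
            · rfl
            · have hne : j'' ≠ j := by
                intro h
                subst h
                obtain ⟨hl2, hg2⟩ := lastIdx?_spec L c' j'' hcl'
                exact hc' (by rw [← hg2, hLj])
              simp only [Option.map_some, Option.some.injEq]
              exact decide_eq_decide.mpr (by omega)
        have hrec : aInner (aBefore L) rest (so.insert c true) =
            bInner (bPos L) rest ((j : Int) + 1) := by
          have hcast : ((j : Int) + 1) = ((j + 1 : Nat) : Int) := by push_cast; ring
          rw [hcast]
          exact ih (j + 1) _ hk' hreach' hsonew
        by_cases hj0 : 0 < j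
        · rw [if_pos hj0]
          dsimp only
          have hpred : lastIdx? L (L.getD (j - 1) ' ') = some (j - 1) := by
            rw [List.getD_eq_getElem?_getD, List.getElem?_eq_getElem (by omega : j - 1 < L.length)]
            exact hreach (j - 1) (by omega) (by omega)
          have hgv : so.getD (L.getD (j - 1) ' ') false = true := by
            rw [PySem.Dict.getD_eq_get?_getD, hso _, hpred]
            simp; omega
          simp only [hgv, if_true]
          exact hrec
        · rw [if_neg hj0]
          dsimp only
          exact hrec
      · -- k < j : both fail
        have hnlt : ¬ ((j : Int) < (k : Int)) := by omega
        have hnbeq : ((j : Int) == (k : Int)) = false := by simp; omega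
        rw [if_neg hnlt]
        simp only [hnbeq, Bool.false_eq_true, if_false]
        have hj0 : 0 < j := by omega
        rw [if_pos hj0]
        dsimp only
        have hpredm : ∃ m, lastIdx? L (L.getD (j - 1) ' ') = some m ∧ j - 1 ≤ m := by
          rw [List.getD_eq_getElem?_getD, List.getElem?_eq_getElem (by omega : j - 1 < L.length)]
          exact le_lastIdx? L _ (j - 1) (by omega) rfl
        obtain ⟨m, hm, hmm⟩ := hpredm
        have hgv : so.getD (L.getD (j - 1) ' ') false = false := by
          rw [PySem.Dict.getD_eq_get?_getD, hso _, hm]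
          simp; omega
        rw [List.getD_eq_getElem?_getD] at hgv
        simp [hgv]

theorem solution_eq (skill : String) (skill_trees : List String) (hpre : skill ≠ "") :
    solution skill skill_trees = solution_alt skill skill_trees := by
  unfold solution solution_alt
  have hL : skill.toList ≠ [] := by
    intro h
    exact hpre (String.toList_eq_nil_iff.mp h)
  apply PySem.List.foldl_congr_mem
  intro acc t _
  have hso0 : ∀ c, (aOrder0 skill.toList).get? c =
      (lastIdx? skill.toList c).map (fun j => decide (j < 0)) := by
    intro c
    rw [aOrder0_get?]
    rcases h : lastIdx? skill.toList c with _ | j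
    · rw [if_neg ((lastIdx?_eq_none_iff _ c).mp h)]; rfl
    · have hmem : c ∈ skill.toList := by
        by_contra hmem
        rw [(lastIdx?_eq_none_iff _ c).mpr hmem] at h; cases h
      rw [if_pos hmem]; simp
  have h2 := inner_eq skill.toList hL t.toList 0 (aOrder0 skill.toList) (Nat.zero_le _)
    (fun j hj h => absurd h (by omega)) hso0
  rw [show ((0:Nat):Int) = 0 from rfl] at h2
  simp only []
  rw [h2]

-- ===== VERDICT (by name: the statement is the Claim_ definition above) =====
theorem solution_spec : Claim_equal_solution := by
  intro skill skill_trees _ hpre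
  exact solution_eq skill skill_trees hpre
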